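-- pv_equiv track=rewrite | github.com/k2works/python-drill | src/chap01_test.py | sum_verbose_1
-- ===== SOURCE A (Python) =====
-- def sum_verbose_1(a, b):
--     """ aからbまでの総和を求める
--
--     >>> sum_verbose_1(3, 4)
--     '3 + 4 = 7'
--     """
--
--     if a > b:
--         a, b = b, a
--
--     sum = 0
--     def buildExpression(i, b): return f'{i} + ' if i < b else f'{i} ='
--     result = ''
--     for i in range(a, b + 1):
--         result += buildExpression(i, b)
--         sum += i
--     result += f' {sum}'
--     return result
-- ===== SOURCE B (Python) =====
-- def sum_verbose_1(a, b):
--     if a > b: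
--         a, b = b, a
--     terms = [str(i) for i in range(a, b + 1)]
--     total = (a + b) * (b - a + 1) // 2
--     return ' + '.join(terms) + ' = ' + str(total)
-- ===== Notes on version B (the rewrite author's own statement) =====
-- stated objective: idiomatic
-- what changed: Replaces the per-element separator branch and running-sum loop with a uniform ' + '.join over str(i) terms plus the closed-form Gauss sum (a+b)*(b-a+1)//2.
import Mathlib
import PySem

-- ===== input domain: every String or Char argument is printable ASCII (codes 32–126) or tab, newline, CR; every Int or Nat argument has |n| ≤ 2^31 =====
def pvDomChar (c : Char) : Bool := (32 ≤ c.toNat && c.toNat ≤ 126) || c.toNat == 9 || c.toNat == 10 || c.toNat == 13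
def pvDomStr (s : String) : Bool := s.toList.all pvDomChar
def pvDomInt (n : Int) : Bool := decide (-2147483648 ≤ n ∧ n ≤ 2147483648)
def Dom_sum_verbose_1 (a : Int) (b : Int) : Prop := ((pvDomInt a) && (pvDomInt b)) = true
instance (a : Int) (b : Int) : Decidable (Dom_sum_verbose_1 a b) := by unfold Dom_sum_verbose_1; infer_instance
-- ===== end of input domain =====

-- B replaces A's per-element separator branch and running sum with a uniform ' + '.join
-- of the terms plus the closed-form Gauss sum (idiomatic decomposition; return value only).

-- ===== PORT A =====
-- buildExpression(i, b)
def pvBuildExpr (i : Int) (b : Int) : String :=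
  if i < b then PySem.Int.toStr i ++ " + " else PySem.Int.toStr i ++ " ="

def sum_verbose_1 (a : Int) (b : Int) : String :=
  let p := if a > b then (b, a) else (a, b)
  let st := (PySem.List.pyRange p.1 (p.2 + 1) 1).foldl
      (fun (st : String × Int) i => (st.1 ++ pvBuildExpr i p.2, st.2 + i)) ("", 0)
  st.1 ++ (" " ++ PySem.Int.toStr st.2)

-- ===== PORT B =====
def sum_verbose_1_alt (a : Int) (b : Int) : String :=
  let p := if a > b then (b, a) else (a, b)
  let terms := (PySem.List.pyRange p.1 (p.2 + 1) 1).map PySem.Int.toStr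
  let total := PySem.Int.floordiv ((p.1 + p.2) * (p.2 - p.1 + 1)) 2
  PySem.Str.join " + " terms ++ " = " ++ PySem.Int.toStr total

-- ===== PRECONDITION & SPEC =====
def Spec_sum_verbose_1 (a : Int) (b : Int) (out : String) : Prop := out = sum_verbose_1_alt a b
instance (a : Int) (b : Int) (out : String) : Decidable (Spec_sum_verbose_1 a b out) := by unfold Spec_sum_verbose_1; infer_instance

-- ===== CLAIM (what is proved, stated in full; the proofs are below) =====
def Claim_equal_sum_verbose_1 : Prop := ∀ (a : Int) (b : Int), Dom_sum_verbose_1 a b → Spec_sum_verbose_1 a b (sum_verbose_1 a b)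

-- ===== LEMMAS AND PROOFS =====

-- the string A's loop concatenates over a list of summands
def pvExpr (bb : Int) : List Int → String
  | [] => ""
  | i :: t => pvBuildExpr i bb ++ pvExpr bb t

theorem pvFoldA (bb : Int) (l : List Int) (acc : String) (s : Int) :
    l.foldl (fun (st : String × Int) i => (st.1 ++ pvBuildExpr i bb, st.2 + i)) (acc, s)
      = (acc ++ pvExpr bb l, s + l.sum) := by
  induction l generalizing acc s with
  | nil => simp [pvExpr]
  | cons i t ih =>
      simp only [List.foldl_cons, ih, pvExpr, List.sum_cons, String.append_assoc]
      congr 1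
      ring

theorem pvExprEq (b : Int) : ∀ (n : Nat) (a : Int), a ≤ b → (b - a).toNat = n →
    pvExpr b (PySem.List.pyRange a (b + 1) 1)
      = PySem.Str.join " + " ((PySem.List.pyRange a (b + 1) 1).map PySem.Int.toStr) ++ " =" := by
  intro n
  induction n with
  | zero =>
      intro a hab hn
      have hab' : a = b := by omega
      subst hab'
      rw [PySem.List.pyRange_one_singleton]
      simp only [pvExpr, pvBuildExpr, lt_irrefl, List.map_cons, List.map_nil]
      apply String.toList_inj.mp
      simp [PySem.Str.toList_join, PySem.Chars.join_singleton]
  | succ n ih =>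
      intro a hab hn
      have hlt : a < b := by omega
      have h1 : a < b + 1 := by omega
      rw [PySem.List.pyRange_one_cons h1]
      have h2 : a + 1 ≤ b := by omega
      have hcons : ∃ y t, PySem.List.pyRange (a + 1) (b + 1) 1 = y :: t := by
        refine ⟨a + 1, PySem.List.pyRange (a + 2) (b + 1) 1, ?_⟩
        have : a + 1 < b + 1 := by omega
        have e : a + 1 + 1 = a + 2 := by omega
        rw [PySem.List.pyRange_one_cons this, e]
      obtain ⟨y, t, hyt⟩ := hcons
      have ihr := ih (a + 1) h2 (by omega)
      simp only [pvExpr, pvBuildExpr, if_pos hlt, ihr, List.map_cons]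
      apply String.toList_inj.mp
      rw [hyt]
      simp only [String.toList_append, PySem.Str.toList_join, List.map_cons,
        PySem.Chars.join_cons_cons]
      simp

theorem pvSumRange : ∀ (n : Nat) (a b : Int), a ≤ b → (b - a).toNat = n →
    2 * (PySem.List.pyRange a (b + 1) 1).sum = (a + b) * (b - a + 1) := by
  intro n
  induction n with
  | zero =>
      intro a b hab hn
      have hab' : a = b := by omega
      subst hab'
      rw [PySem.List.pyRange_one_singleton]
      simp; ring
  | succ n ih =>
      intro a b hab hn
      have hb : a ≤ b - 1 := by omega
      have := ih a (b - 1) hb (by omega)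
      have hsplit : PySem.List.pyRange a (b + 1) 1
          = PySem.List.pyRange a ((b - 1) + 1) 1 ++ [b] := by
        have h := PySem.List.pyRange_one_succ_right (a := a) (b := b) (by omega)
        simpa using h
      rw [hsplit, List.sum_append]
      simp at this ⊢
      nlinarith [this]

theorem pvFloordivTwo (k : Int) : PySem.Int.floordiv (2 * k) 2 = k := by
  simp [PySem.Int.floordiv]

theorem pvMain (a b : Int) (hab : a ≤ b) :
    (let st := (PySem.List.pyRange a (b + 1) 1).foldl
        (fun (st : String × Int) i => (st.1 ++ pvBuildExpr i b, st.2 + i)) ("", 0)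
     st.1 ++ (" " ++ PySem.Int.toStr st.2))
      = PySem.Str.join " + " ((PySem.List.pyRange a (b + 1) 1).map PySem.Int.toStr) ++ " = "
          ++ PySem.Int.toStr (PySem.Int.floordiv ((a + b) * (b - a + 1)) 2) := by
  have hsum : (a + b) * (b - a + 1) = 2 * (PySem.List.pyRange a (b + 1) 1).sum :=
    (pvSumRange (b - a).toNat a b hab rfl).symm
  rw [pvFoldA, pvExprEq b (b - a).toNat a hab rfl, hsum, pvFloordivTwo]
  apply String.toList_inj.mp
  simp [String.toList_append]

-- ===== VERDICT (by name: the statement is the Claim_ definition above) =====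
theorem sum_verbose_1_spec : Claim_equal_sum_verbose_1 := by
  intro a b _
  unfold Spec_sum_verbose_1 sum_verbose_1 sum_verbose_1_alt
  by_cases h : a > b
  · simp only [if_pos h]
    exact pvMain b a (by omega)
  · simp only [if_neg h]
    exact pvMain a b (by omega)
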